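-- pv_equiv track=rewrite | github.com/tusharsingh00/Infosys_Programming_fundamental_using_python | Python_programming_fundamental_part_2/Pratice_problem_Level_1/pratice_problem_12.py | generate_sentences
-- ===== SOURCE A (Python) =====
-- def generate_sentences(subjects,verbs,objects):
-- 	sentence_list = []
-- 	for subj in subjects:
-- 		for ver in verbs:
-- 			for obj in objects:
-- 				a = (f"{subj} {ver} {obj}")
--
-- 				sentence_list.append(a)
-- 	# return(list1)
--
-- 	return sentence_list
--
-- subjects=["I","You"]
--
-- verbs=["love", "play"]
--
-- objects=["Hockey","Football"]
-- ===== SOURCE B (Python) =====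
-- def generate_sentences(subjects, verbs, objects):
--     acc = [f"{s}" for s in subjects]
--     acc = [f"{a} {v}" for a in acc for v in verbs]
--     acc = [f"{a} {o}" for a in acc for o in objects]
--     return acc
-- ===== Notes on version B (the rewrite author's own statement) =====
-- stated objective: alternative
-- what changed: Replaces the three statically nested loops with a per-dimension fold: a list of partial sentences is seeded from the subjects and extended once by the verbs and once by the objects.
import Mathlib
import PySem

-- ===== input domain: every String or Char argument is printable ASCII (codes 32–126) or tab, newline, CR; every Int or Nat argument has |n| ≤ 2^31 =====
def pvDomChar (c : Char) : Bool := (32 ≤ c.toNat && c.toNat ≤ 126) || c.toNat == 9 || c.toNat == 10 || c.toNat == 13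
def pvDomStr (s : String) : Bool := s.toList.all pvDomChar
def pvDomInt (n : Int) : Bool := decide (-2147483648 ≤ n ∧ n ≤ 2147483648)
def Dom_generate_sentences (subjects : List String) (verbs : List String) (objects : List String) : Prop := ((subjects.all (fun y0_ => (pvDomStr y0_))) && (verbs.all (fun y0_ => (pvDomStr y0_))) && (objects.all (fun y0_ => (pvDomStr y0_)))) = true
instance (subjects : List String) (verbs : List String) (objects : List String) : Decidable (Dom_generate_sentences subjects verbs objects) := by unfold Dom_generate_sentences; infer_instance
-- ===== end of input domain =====

-- B builds the product incrementally: a per-dimension fold over partial sentences instead of three nested loops.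


-- ===== PORT A =====
def generate_sentences (subjects : List String) (verbs : List String) (objects : List String) : List String :=
  subjects.foldl (fun sentence_list subj =>
    verbs.foldl (fun sentence_list ver =>
      objects.foldl (fun sentence_list obj =>
        sentence_list ++ [subj ++ " " ++ ver ++ " " ++ obj]) sentence_list) sentence_list) []

-- ===== PORT B =====
def generate_sentences_alt (subjects : List String) (verbs : List String) (objects : List String) : List String :=
  let acc0 := subjects.map (fun s => s)
  let acc1 := acc0.flatMap (fun a => verbs.map (fun v => a ++ " " ++ v))
  let acc2 := acc1.flatMap (fun a => objects.map (fun o => a ++ " " ++ o))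
  acc2

-- ===== PRECONDITION & SPEC =====
def Spec_generate_sentences (subjects : List String) (verbs : List String) (objects : List String) (out : List String) : Prop := out = generate_sentences_alt subjects verbs objects
instance (subjects : List String) (verbs : List String) (objects : List String) (out : List String) : Decidable (Spec_generate_sentences subjects verbs objects out) := by unfold Spec_generate_sentences; infer_instance

-- ===== CLAIM (what is proved, stated in full; the proofs are below) =====
def Claim_equal_generate_sentences : Prop := ∀ (subjects : List String) (verbs : List String) (objects : List String), Dom_generate_sentences subjects verbs objects → Spec_generate_sentences subjects verbs objects (generate_sentences subjects verbs objects)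

-- ===== LEMMAS AND PROOFS =====
theorem generate_sentences_eq (subjects verbs objects : List String) :
    generate_sentences subjects verbs objects = generate_sentences_alt subjects verbs objects := by
  simp [generate_sentences, generate_sentences_alt,
    List.flatMap_assoc, List.flatMap_map, String.append_assoc, ← List.flatMap_def, ← List.map_eq_flatMap]

-- ===== VERDICT (by name: the statement is the Claim_ definition above) =====
theorem generate_sentences_spec : Claim_equal_generate_sentences := by
  intro s v o _
  exact generate_sentences_eq s v o
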